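-- pv_equiv track=rewrite | github.com/LeeDayday/programmers | src/30-131127.py | solution
-- ===== SOURCE A (Python) =====
-- def solution(want, number, discount):
--     answer = 0
--     data = dict()
--     for i in range(len(want)):
--         data[want[i]] = number[i]
--
--     for i in range(len(discount) - 9):
--         tmp_answer = 0
--         tmp_data = data.copy()
--
--         for name in discount[i:i+10]:
--             if name in tmp_data.keys():
--                 if tmp_data[name] > 0:
--                     tmp_data[name] -= 1
--                     tmp_answer += 1
--
--         if tmp_answer == 10:
--             answer += 1
--
--     return answer
-- ===== SOURCE B (Python) =====
-- def solution(want, number, discount):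
--     # Sliding window: one incremental count map + running "excess" counter,
--     # instead of copying the quota dict and re-scanning for every window.
--     quota = dict(zip(want, number))
--     n = len(discount)
--     if n < 10:
--         return 0
--     cnt = {}
--     excess = 0
--     for name in discount[:10]:
--         c = cnt.get(name, 0) + 1
--         cnt[name] = c
--         if c > quota.get(name, 0):
--             excess += 1
--     answer = 1 if excess == 0 else 0
--     for i in range(10, n):
--         out = discount[i - 10]
--         c = cnt[out]
--         if c > quota.get(out, 0):
--             excess -= 1
--         cnt[out] = c - 1
--         inn = discount[i]
--         c2 = cnt.get(inn, 0) + 1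
--         cnt[inn] = c2
--         if c2 > quota.get(inn, 0):
--             excess += 1
--         if excess == 0:
--             answer += 1
--     return answer
-- ===== Notes on version B (the rewrite author's own statement) =====
-- stated objective: faster
-- what changed: B replaces A's per-window dict copy and re-scan with a single sliding window that maintains an incremental count map and a running excess counter, so each day is processed once.
-- outside the precondition, e.g. on solution(['a'], [], []): A raises IndexError, B returns 0
import Mathlib
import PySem

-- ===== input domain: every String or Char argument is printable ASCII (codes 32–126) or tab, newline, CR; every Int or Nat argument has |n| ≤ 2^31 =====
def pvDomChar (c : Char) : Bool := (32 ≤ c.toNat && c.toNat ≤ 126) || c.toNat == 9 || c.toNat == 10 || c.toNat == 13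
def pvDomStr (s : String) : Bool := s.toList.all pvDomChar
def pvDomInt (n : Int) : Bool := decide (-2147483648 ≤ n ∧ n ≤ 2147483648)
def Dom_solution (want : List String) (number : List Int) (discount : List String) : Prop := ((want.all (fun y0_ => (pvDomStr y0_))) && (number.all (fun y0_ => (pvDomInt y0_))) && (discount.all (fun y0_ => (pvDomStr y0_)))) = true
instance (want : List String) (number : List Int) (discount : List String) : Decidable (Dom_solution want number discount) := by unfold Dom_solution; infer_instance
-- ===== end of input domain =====

-- B replaces A's per-window dict copy and re-scan by one sliding window with an
-- incremental count map and a running excess counter (objective: faster).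

-- ===== PORT A =====
def solution (want : List String) (number : List Int) (discount : List String) : Int :=
  -- data[want[i]] = number[i]; number[i] raises IndexError when i ≥ len(number) (excluded by Pre_); getD 0 is dead there
  let data : PySem.Dict String Int :=
    (PySem.List.pyRange 0 (want.length : Int) 1).foldl
      (fun d i => d.insert (PySem.List.pyGetD want i "") (PySem.List.pyGetD number i 0))
      PySem.Dict.empty
  (PySem.List.pyRange 0 ((discount.length : Int) - 9) 1).foldl
    (fun answer i =>
      let s := (PySem.List.slice discount (some i) (some (i + 10))).foldl
        (fun (s : PySem.Dict String Int × Int) name =>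
          if s.1.contains name then
            if ((s.1.get? name).getD 0) > 0 then
              (s.1.insert name ((s.1.get? name).getD 0 - 1), s.2 + 1)
            else s
          else s)
        (data, 0)
      if s.2 == 10 then answer + 1 else answer)
    0

-- ===== PORT B =====
def solution_alt (want : List String) (number : List Int) (discount : List String) : Int :=
  let quota : PySem.Dict String Int :=
    (want.zip number).foldl (fun d p => d.insert p.1 p.2) PySem.Dict.empty
  let n : Int := (discount.length : Int)
  if n < 10 then 0
  else
    let init := (PySem.List.slice discount none (some 10)).foldl
      (fun (s : PySem.Dict String Int × Int) name =>
        let c := s.1.getD name 0 + 1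
        (s.1.insert name c, if c > quota.getD name 0 then s.2 + 1 else s.2))
      (PySem.Dict.empty, 0)
    let start : Int := if init.2 == 0 then 1 else 0
    let res := (PySem.List.pyRange 10 n 1).foldl
      (fun (s : PySem.Dict String Int × Int × Int) i =>
        -- cnt[out]: the key is always present (it entered the window earlier); getD 0 is dead
        let out := PySem.List.pyGetD discount (i - 10) ""
        let c := s.1.getD out 0
        let e1 := if c > quota.getD out 0 then s.2.1 - 1 else s.2.1
        let cnt1 := s.1.insert out (c - 1)
        let inn := PySem.List.pyGetD discount i ""
        let c2 := cnt1.getD inn 0 + 1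
        let cnt2 := cnt1.insert inn c2
        let e2 := if c2 > quota.getD inn 0 then e1 + 1 else e1
        (cnt2, e2, if e2 == 0 then s.2.2 + 1 else s.2.2))
      (init.1, init.2, start)
    res.2.2

-- ===== PRECONDITION & SPEC =====
-- Pre_ excludes exactly the inputs where A raises IndexError (number[i] with i ≥ len(number)).
def Pre_solution (want : List String) (number : List Int) (discount : List String) : Prop :=
  want.length ≤ number.length
instance (want : List String) (number : List Int) (discount : List String) : Decidable (Pre_solution want number discount) := by unfold Pre_solution; infer_instance
def pvWitness_solution : List String × List Int × List String :=
  (["a"], [2], ["a", "b", "a", "a", "a", "a", "a", "a", "a", "a", "b"])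

def Spec_solution (want : List String) (number : List Int) (discount : List String) (out : Int) : Prop := out = solution_alt want number discount
instance (want : List String) (number : List Int) (discount : List String) (out : Int) : Decidable (Spec_solution want number discount out) := by unfold Spec_solution; infer_instance

-- ===== CLAIM (what is proved, stated in full; the proofs are below) =====
def Claim_equal_solution : Prop := ∀ (want : List String) (number : List Int) (discount : List String), Dom_solution want number discount → Pre_solution want number discount → Spec_solution want number discount (solution want number discount)
-- ===== LEMMAS AND PROOFS =====

def pvQ (Q : PySem.Dict String Int) (nm : String) : Int := Q.getD nm 0
def pvEx (Q : PySem.Dict String Int) (nm : String) (c : Nat) : Int :=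
  max ((c : Int) - max (pvQ Q nm) 0) 0
def pvF (Q : PySem.Dict String Int) (l : List String) : Int :=
  (l.dedup.map (fun nm => pvEx Q nm (l.count nm))).sum
def pvInd (Q : PySem.Dict String Int) (nm : String) (c : Nat) : Int :=
  if (c : Int) + 1 > pvQ Q nm then 1 else 0

theorem pvEx_succ (Q : PySem.Dict String Int) (nm : String) (c : Nat) :
    pvEx Q nm (c + 1) = pvEx Q nm c + pvInd Q nm c := by
  simp only [pvEx, pvInd]
  split <;> push_cast <;> omega

theorem pvEx_one_eq_ind_zero (Q : PySem.Dict String Int) (nm : String) :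
    pvEx Q nm 1 = pvInd Q nm 0 := by
  simp only [pvEx, pvInd]
  split <;> push_cast <;> omega

theorem pvSum_congr_except (d : List String) (hd : d.Nodup) (x : String) (hx : x ∈ d)
    (f g : String → Int) (h : ∀ n ∈ d, n ≠ x → f n = g n) :
    (d.map f).sum = (d.map g).sum + (f x - g x) := by
  induction d with
  | nil => cases hx
  | cons a t ih =>
    have hant : a ∉ t := (List.nodup_cons.mp hd).1
    have hnt : t.Nodup := (List.nodup_cons.mp hd).2
    rcases List.mem_cons.mp hx with he | hxt
    · subst he
      have hmap : t.map f = t.map g :=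
        List.map_congr_left (fun n hn => h n (List.mem_cons_of_mem _ hn) (fun he2 => hant (he2 ▸ hn)))
      simp only [List.map_cons, List.sum_cons, hmap]
      ring
    · have ha : f a = g a := h a (List.mem_cons_self) (fun he2 => hant (he2 ▸ hxt))
      simp only [List.map_cons, List.sum_cons, ha,
        ih hnt hxt (fun n hn hne => h n (List.mem_cons_of_mem _ hn) hne)]
      ring

theorem pvF_cons (Q : PySem.Dict String Int) (x : String) (l : List String) :
    pvF Q (x :: l) = pvInd Q x (l.count x) + pvF Q l := by
  by_cases hx : x ∈ l
  · have hded : (x :: l).dedup = l.dedup := List.dedup_cons_of_mem hx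
    simp only [pvF, hded]
    rw [pvSum_congr_except l.dedup l.nodup_dedup x (List.mem_dedup.mpr hx)
      (fun nm => pvEx Q nm ((x :: l).count nm)) (fun nm => pvEx Q nm (l.count nm))
      (fun n _ hne => by simp [hne.symm])]
    rw [List.count_cons_self, pvEx_succ]
    ring
  · have hded : (x :: l).dedup = x :: l.dedup := List.dedup_cons_of_notMem hx
    have hc0 : l.count x = 0 := List.count_eq_zero.mpr hx
    have hmap : l.dedup.map (fun nm => pvEx Q nm ((x :: l).count nm))
        = l.dedup.map (fun nm => pvEx Q nm (l.count nm)) := by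
      apply List.map_congr_left
      intro n hn
      have hne : n ≠ x := fun he => hx (he ▸ List.mem_dedup.mp hn)
      simp [hne.symm]
    simp only [pvF, hded, List.map_cons, List.sum_cons, hmap, List.count_cons_self, hc0]
    rw [pvEx_one_eq_ind_zero]

theorem pvF_perm (Q : PySem.Dict String Int) {l l' : List String} (h : l.Perm l') :
    pvF Q l = pvF Q l' := by
  simp only [pvF]
  have h1 : l.dedup.map (fun nm => pvEx Q nm (l.count nm))
      = l.dedup.map (fun nm => pvEx Q nm (l'.count nm)) :=
    List.map_congr_left (fun n _ => by rw [h.count_eq])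
  rw [h1]
  exact ((h.dedup).map _).sum_eq

theorem pvF_snoc (Q : PySem.Dict String Int) (l : List String) (x : String) :
    pvF Q (l ++ [x]) = pvF Q l + pvInd Q x (l.count x) := by
  rw [pvF_perm Q (List.perm_append_singleton x l), pvF_cons]; ring

theorem pvLemA (Q : PySem.Dict String Int) :
    ∀ (l p : List String) (tmp : PySem.Dict String Int) (a : Int),
    (∀ nm, tmp.get? nm = (Q.get? nm).map (fun q0 => q0 - min ((p.count nm : Int)) (max q0 0))) →
    (l.foldl (fun (s : PySem.Dict String Int × Int) name =>
        if s.1.contains name then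
          if ((s.1.get? name).getD 0) > 0 then
            (s.1.insert name ((s.1.get? name).getD 0 - 1), s.2 + 1)
          else s
        else s) (tmp, a)).2
     = a + l.length - (pvF Q (p ++ l) - pvF Q p) := by
  intro l
  induction l with
  | nil => intro p tmp a _; simp
  | cons x r ih =>
    intro p tmp a hrel
    have hc0 : (0 : Int) ≤ (p.count x : Int) := Int.natCast_nonneg _
    have hFstep : pvF Q (p ++ [x]) = pvF Q p + pvInd Q x (p.count x) := pvF_snoc Q p x
    have hassoc : p ++ x :: r = (p ++ [x]) ++ r := by simp
    have hcnt : ∀ nm, ((p ++ [x]).count nm : Int)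
        = (p.count nm : Int) + (if nm = x then 1 else 0) := by
      intro nm
      by_cases h : nm = x
      · subst h; simp [List.count_append]
      · simp [List.count_append, h, Ne.symm h]
    simp only [List.foldl_cons]
    rw [PySem.Dict.contains_eq_isSome_get?, hrel x]
    cases hq : Q.get? x with
    | none =>
      have hq0 : pvQ Q x = 0 := by simp [pvQ, PySem.Dict.getD_eq_get?_getD, hq]
      have hind : pvInd Q x (p.count x) = 1 := by simp only [pvInd, hq0]; split <;> omega
      simp only [Option.map_none, Option.isSome_none, if_neg Bool.false_ne_true]
      rw [ih (p ++ [x]) tmp a (fun nm => by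
        rw [hrel nm, hcnt nm]
        by_cases hnm : nm = x
        · subst hnm; rw [hq]; simp
        · simp [hnm])]
      rw [hassoc] at *
      rw [hFstep]
      simp only [List.length_cons]
      push_cast
      omega
    | some q0 =>
      have hq0 : pvQ Q x = q0 := by simp [pvQ, PySem.Dict.getD_eq_get?_getD, hq]
      simp only [Option.map_some, Option.isSome_some, if_true, Option.getD_some]
      set c : Int := (p.count x : Int) with hcdef
      by_cases hpos : q0 - min c (max q0 0) > 0
      · -- decrement happens; c < q0
        have hlt : c < q0 := by omega
        have hind : pvInd Q x (p.count x) = 0 := by simp only [pvInd, hq0]; split <;> omega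
        rw [if_pos hpos]
        rw [ih (p ++ [x]) _ (a + 1) (fun nm => by
          by_cases hnm : nm = x
          · subst hnm
            rw [PySem.Dict.get?_insert_self, hq, hcnt]
            simp only [if_true, Option.map_some]
            congr 1
            omega
          · rw [PySem.Dict.get?_insert_of_ne _ _ hnm, hrel nm, hcnt nm]
            simp [hnm])]
        rw [hassoc] at *
        rw [hFstep]
        simp only [List.length_cons]
        push_cast
        omega
      · -- no decrement; q0 ≤ c (or q0 ≤ 0)
        have hind : pvInd Q x (p.count x) = 1 := by simp only [pvInd, hq0]; split <;> omega
        rw [if_neg hpos]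
        rw [ih (p ++ [x]) tmp a (fun nm => by
          rw [hrel nm, hcnt nm]
          by_cases hnm : nm = x
          · subst hnm
            rw [hq]
            simp only [if_true, Option.map_some]
            congr 1
            omega
          · simp [hnm])]
        rw [hassoc] at *
        rw [hFstep]
        simp only [List.length_cons]
        push_cast
        omega

theorem pvLemB (Q : PySem.Dict String Int) :
    ∀ (l p : List String) (cnt : PySem.Dict String Int) (e : Int),
    (∀ nm, cnt.getD nm 0 = (p.count nm : Int)) →
    (∀ nm, (l.foldl (fun (s : PySem.Dict String Int × Int) name =>
        (s.1.insert name (s.1.getD name 0 + 1),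
         if s.1.getD name 0 + 1 > Q.getD name 0 then s.2 + 1 else s.2)) (cnt, e)).1.getD nm 0
        = ((p ++ l).count nm : Int)) ∧
    (l.foldl (fun (s : PySem.Dict String Int × Int) name =>
        (s.1.insert name (s.1.getD name 0 + 1),
         if s.1.getD name 0 + 1 > Q.getD name 0 then s.2 + 1 else s.2)) (cnt, e)).2
      = e + (pvF Q (p ++ l) - pvF Q p) := by
  intro l
  induction l with
  | nil =>
    intro p cnt e hrel
    exact ⟨fun nm => by simpa using hrel nm, by simp⟩
  | cons x r ih =>
    intro p cnt e hrel
    have hassoc : p ++ x :: r = (p ++ [x]) ++ r := by simp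
    have hcnt' : ∀ nm, ((cnt.insert x (cnt.getD x 0 + 1)).getD nm 0) = ((p ++ [x]).count nm : Int) := by
      intro nm
      rw [PySem.Dict.getD_insert]
      by_cases hnm : nm = x
      · rw [if_pos hnm, hrel x, hnm]
        have hca : (p ++ [x]).count x = p.count x + 1 := by simp [List.count_append]
        rw [hca]; push_cast; ring
      · simp [hnm, hrel, List.count_append, Ne.symm hnm]
    have hFstep : pvF Q (p ++ [x]) = pvF Q p + pvInd Q x (p.count x) := pvF_snoc Q p x
    have hif : (if cnt.getD x 0 + 1 > Q.getD x 0 then e + 1 else e) = e + pvInd Q x (p.count x) := by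
      rw [hrel x]
      simp only [pvInd, pvQ]
      split <;> omega
    simp only [List.foldl_cons]
    obtain ⟨h1, h2⟩ := ih (p ++ [x]) (cnt.insert x (cnt.getD x 0 + 1))
      (if cnt.getD x 0 + 1 > Q.getD x 0 then e + 1 else e) hcnt'
    constructor
    · intro nm; rw [h1 nm, hassoc]
    · rw [h2, hif, hassoc, hFstep]; ring

theorem pvW_cons (l : List String) (m : Nat) (h : m + 10 ≤ l.length) :
    (l.drop m).take 10 = l.getD m "" :: ((l.drop (m + 1)).take 9) := by
  have hm : m < l.length := by omega
  rw [List.drop_eq_getElem_cons hm, List.getD_eq_getElem l "" hm]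
  rfl

theorem pvW_snoc (l : List String) (m : Nat) (h : m + 11 ≤ l.length) :
    (l.drop (m + 1)).take 10 = (l.drop (m + 1)).take 9 ++ [l.getD (10 + m) ""] := by
  have h9 : 9 < (l.drop (m + 1)).length := by simp [List.length_drop]; omega
  have h10 : 10 + m < l.length := by omega
  have : (l.drop (m + 1)).take 10 = (l.drop (m + 1)).take 9 ++ (l.drop (m + 1))[9]?.toList :=
    List.take_add_one
  rw [this, List.getElem?_drop, List.getElem?_eq_getElem (by omega : m + 1 + 9 < l.length)]
  rw [List.getD_eq_getElem l "" h10]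
  have : m + 1 + 9 = 10 + m := by omega
  simp [this]

theorem pvSlide (Q : PySem.Dict String Int) (dc : List String)
    (cnt0 : PySem.Dict String Int) (e0 a0 : Int)
    (hc : ∀ nm, cnt0.getD nm 0 = ((dc.take 10).count nm : Int))
    (he : e0 = pvF Q (dc.take 10))
    (ha : a0 = ((List.range 1).countP (fun k => decide (pvF Q ((dc.drop k).take 10) = 0)) : Int)) :
    ∀ (m : Nat), m ≤ dc.length - 10 → 10 ≤ dc.length →
    (∀ nm, (((List.range m).map (fun (k : Nat) => ((10 : Int) + (k : Int)))).foldl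
        (fun (s : PySem.Dict String Int × Int × Int) i =>
          let out := PySem.List.pyGetD dc (i - 10) ""
          let c := s.1.getD out 0
          let e1 := if c > Q.getD out 0 then s.2.1 - 1 else s.2.1
          let cnt1 := s.1.insert out (c - 1)
          let inn := PySem.List.pyGetD dc i ""
          let c2 := cnt1.getD inn 0 + 1
          let cnt2 := cnt1.insert inn c2
          let e2 := if c2 > Q.getD inn 0 then e1 + 1 else e1
          (cnt2, e2, if e2 == 0 then s.2.2 + 1 else s.2.2))
        (cnt0, e0, a0)).1.getD nm 0 = (((dc.drop m).take 10).count nm : Int)) ∧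
    (((List.range m).map (fun (k : Nat) => ((10 : Int) + (k : Int)))).foldl
        (fun (s : PySem.Dict String Int × Int × Int) i =>
          let out := PySem.List.pyGetD dc (i - 10) ""
          let c := s.1.getD out 0
          let e1 := if c > Q.getD out 0 then s.2.1 - 1 else s.2.1
          let cnt1 := s.1.insert out (c - 1)
          let inn := PySem.List.pyGetD dc i ""
          let c2 := cnt1.getD inn 0 + 1
          let cnt2 := cnt1.insert inn c2
          let e2 := if c2 > Q.getD inn 0 then e1 + 1 else e1
          (cnt2, e2, if e2 == 0 then s.2.2 + 1 else s.2.2))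
        (cnt0, e0, a0)).2.1 = pvF Q ((dc.drop m).take 10) ∧
    (((List.range m).map (fun (k : Nat) => ((10 : Int) + (k : Int)))).foldl
        (fun (s : PySem.Dict String Int × Int × Int) i =>
          let out := PySem.List.pyGetD dc (i - 10) ""
          let c := s.1.getD out 0
          let e1 := if c > Q.getD out 0 then s.2.1 - 1 else s.2.1
          let cnt1 := s.1.insert out (c - 1)
          let inn := PySem.List.pyGetD dc i ""
          let c2 := cnt1.getD inn 0 + 1
          let cnt2 := cnt1.insert inn c2
          let e2 := if c2 > Q.getD inn 0 then e1 + 1 else e1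
          (cnt2, e2, if e2 == 0 then s.2.2 + 1 else s.2.2))
        (cnt0, e0, a0)).2.2
      = ((List.range (m + 1)).countP (fun k => decide (pvF Q ((dc.drop k).take 10) = 0)) : Int) := by
  intro m
  induction m with
  | zero =>
    intro _ _
    simp only [List.range_zero, List.map_nil, List.foldl_nil, List.drop_zero]
    exact ⟨hc, he, ha⟩
  | succ m ihm =>
    intro hm hlen
    have hm' : m ≤ dc.length - 10 := by omega
    obtain ⟨ih1, ih2, ih3⟩ := ihm hm' hlen
    rw [List.range_succ, List.map_append, List.foldl_append]
    simp only [List.map_cons, List.map_nil, List.foldl_cons, List.foldl_nil]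
    set s := ((List.range m).map (fun (k : Nat) => ((10 : Int) + (k : Int)))).foldl
        (fun (s : PySem.Dict String Int × Int × Int) i =>
          let out := PySem.List.pyGetD dc (i - 10) ""
          let c := s.1.getD out 0
          let e1 := if c > Q.getD out 0 then s.2.1 - 1 else s.2.1
          let cnt1 := s.1.insert out (c - 1)
          let inn := PySem.List.pyGetD dc i ""
          let c2 := cnt1.getD inn 0 + 1
          let cnt2 := cnt1.insert inn c2
          let e2 := if c2 > Q.getD inn 0 then e1 + 1 else e1
          (cnt2, e2, if e2 == 0 then s.2.2 + 1 else s.2.2))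
        (cnt0, e0, a0) with hs
    -- names for the two boundary elements and the 9-day middle
    set out := dc.getD m "" with hout
    set inn := dc.getD (10 + m) "" with hinn
    set M : List String := (dc.drop (m + 1)).take 9 with hM
    have hWm : (dc.drop m).take 10 = out :: M := pvW_cons dc m (by omega)
    have hW1 : (dc.drop (m + 1)).take 10 = M ++ [inn] := pvW_snoc dc m (by omega)
    have hidx1 : (10 : Int) + (m : Int) - 10 = ((m : Nat) : Int) := by ring
    have hidx2 : (10 : Int) + (m : Int) = (((10 + m : Nat)) : Int) := by push_cast; ring
    have hget1 : PySem.List.pyGetD dc ((10 : Int) + (m : Int) - 10) "" = out := by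
      rw [hidx1, PySem.List.pyGetD_natCast]
    have hget2 : PySem.List.pyGetD dc ((10 : Int) + (m : Int)) "" = inn := by
      rw [hidx2, PySem.List.pyGetD_natCast]
    simp only [hget1, hget2]
    -- the count of out in the current window
    have hcout : s.1.getD out 0 = (M.count out : Int) + 1 := by
      rw [ih1 out, hWm]; push_cast [List.count_cons_self]; ring
    -- removal step: excess drops to pvF Q M
    have hFWm : pvF Q (out :: M) = pvInd Q out (M.count out) + pvF Q M := pvF_cons Q out M
    have he1 : (if s.1.getD out 0 > Q.getD out 0 then s.2.1 - 1 else s.2.1) = pvF Q M := by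
      rw [hcout, ih2, hWm, hFWm]
      simp only [pvInd, pvQ]
      split <;> omega
    -- after removal the dict counts M
    have hcnt1 : ∀ nm, (s.1.insert out (s.1.getD out 0 - 1)).getD nm 0 = (M.count nm : Int) := by
      intro nm
      rw [PySem.Dict.getD_insert]
      by_cases hnm : nm = out
      · rw [if_pos hnm, hcout, hnm]; ring
      · rw [if_neg hnm, ih1 nm, hWm]
        simp [Ne.symm hnm]
    -- addition step
    have hc2 : (s.1.insert out (s.1.getD out 0 - 1)).getD inn 0 + 1 = (M.count inn : Int) + 1 := by
      rw [hcnt1 inn]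
    have hFW1 : pvF Q (M ++ [inn]) = pvF Q M + pvInd Q inn (M.count inn) := pvF_snoc Q M inn
    have he2 : (if (s.1.insert out (s.1.getD out 0 - 1)).getD inn 0 + 1 > Q.getD inn 0
          then (if s.1.getD out 0 > Q.getD out 0 then s.2.1 - 1 else s.2.1) + 1
          else (if s.1.getD out 0 > Q.getD out 0 then s.2.1 - 1 else s.2.1))
        = pvF Q ((dc.drop (m + 1)).take 10) := by
      rw [he1, hc2, hW1, hFW1]
      simp only [pvInd, pvQ]
      split <;> omega
    refine ⟨?_, ?_, ?_⟩
    · intro nm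
      show ((s.1.insert out (s.1.getD out 0 - 1)).insert inn
          ((s.1.insert out (s.1.getD out 0 - 1)).getD inn 0 + 1)).getD nm 0 = _
      rw [PySem.Dict.getD_insert]
      by_cases hnm : nm = inn
      · rw [if_pos hnm, hc2, hnm, hW1]
        push_cast [List.count_append]
        simp
      · rw [if_neg hnm, hcnt1 nm, hW1]
        push_cast [List.count_append, List.count_cons, List.count_nil]
        simp [Ne.symm hnm]
    · exact he2
    · show (if ((if (s.1.insert out (s.1.getD out 0 - 1)).getD inn 0 + 1 > Q.getD inn 0
          then (if s.1.getD out 0 > Q.getD out 0 then s.2.1 - 1 else s.2.1) + 1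
          else (if s.1.getD out 0 > Q.getD out 0 then s.2.1 - 1 else s.2.1))) == 0
          then s.2.2 + 1 else s.2.2) = _
      rw [he2, ih3]
      rw [List.range_succ (n := m + 1), List.countP_append]
      simp only [List.countP_cons, List.countP_nil]
      by_cases hz : pvF Q ((dc.drop (m + 1)).take 10) = 0
      · rw [if_pos (by simpa using hz)]
        simp [hz]
      · rw [if_neg (by simpa using hz)]
        simp [hz]


theorem pvF_nil (Q : PySem.Dict String Int) : pvF Q [] = 0 := by simp [pvF]

theorem pvRel0 (Q : PySem.Dict String Int) (nm : String) :
    Q.get? nm = (Q.get? nm).map (fun q0 => q0 - min ((([] : List String).count nm : Int)) (max q0 0)) := by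
  cases h : Q.get? nm with
  | none => rfl
  | some q0 => simp

theorem pvZipMap (w : List String) (nb : List Int) (h : w.length ≤ nb.length) :
    (List.range w.length).map (fun k => (w.getD k "", nb.getD k 0)) = w.zip nb := by
  apply List.ext_getElem
  · simp; omega
  · intro i h1 h2
    have hi : i < w.length := by simpa using h1
    have hi2 : i < nb.length := by omega
    simp only [List.getElem_map, List.getElem_range, List.getElem_zip,
      List.getD_eq_getElem w "" hi, List.getD_eq_getElem nb 0 hi2]

theorem pvBuild (w : List String) (nb : List Int) (h : w.length ≤ nb.length) :
    (PySem.List.pyRange 0 (w.length : Int) 1).foldl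
      (fun d i => d.insert (PySem.List.pyGetD w i "") (PySem.List.pyGetD nb i 0)) PySem.Dict.empty
    = (w.zip nb).foldl (fun d p => d.insert p.1 p.2) PySem.Dict.empty := by
  rw [PySem.List.pyRange_one, List.foldl_map]
  have ht : ((w.length : Int) - 0).toNat = w.length := by omega
  rw [ht]
  rw [← pvZipMap w nb h, List.foldl_map]
  apply PySem.List.foldl_congr_mem
  intro acc k hk
  have hk' : k < w.length := List.mem_range.mp hk
  simp [PySem.List.pyGetD_natCast]

theorem pvMain (want : List String) (number : List Int) (discount : List String)
    (hpre : want.length ≤ number.length) :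
    solution want number discount = solution_alt want number discount := by
  unfold solution solution_alt
  rw [pvBuild want number hpre]
  set Q : PySem.Dict String Int := (want.zip number).foldl (fun d p => d.insert p.1 p.2) PySem.Dict.empty with hQ
  set n : Nat := discount.length with hn
  by_cases hlt : (n : Int) < 10
  · rw [if_pos hlt, PySem.List.pyRange_one]
    have hz : ((n : Int) - 9 - 0).toNat = 0 := by omega
    rw [hz]
    simp
  · rw [if_neg hlt]
    have h10 : 10 ≤ n := by omega
    simp only []
    -- ===== A side: rewrite the outer loop into a countP over windows =====
    rw [PySem.List.pyRange_one, List.foldl_map]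
    have hA : ((n : Int) - 9 - 0).toNat = n - 9 := by omega
    rw [hA]
    rw [PySem.List.foldl_congr_mem (List.range (n - 9)) _
      (fun (ans : Int) (k : Nat) => if pvF Q ((discount.drop k).take 10) = 0 then ans + 1 else ans)
      0 ?hbody]
    case hbody =>
      intro acc k hk
      have hk' : k < n - 9 := List.mem_range.mp hk
      have hk10 : k + 10 ≤ n := by omega
      have hsl : PySem.List.slice discount (some (0 + (k : Int))) (some (0 + (k : Int) + 10))
          = (discount.drop k).take 10 := by
        rw [show (0 + (k : Int) + 10) = ((k : Int) + ((10 : Nat) : Int)) by push_cast; ring,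
          show (0 + (k : Int)) = ((k : Int)) by ring]
        exact PySem.List.slice_natCast_add discount k 10
      rw [hsl]
      have hin := pvLemA Q ((discount.drop k).take 10) [] Q 0 (pvRel0 Q)
      rw [List.nil_append] at hin
      have hlen : (((discount.drop k).take 10).length : Int) = 10 := by
        simp [List.length_take, List.length_drop]; omega
      rw [hin, hlen, pvF_nil]
      show (if (0 + 10 - (pvF Q ((discount.drop k).take 10) - 0) == 10) = true then acc + 1 else acc)
          = if pvF Q ((discount.drop k).take 10) = 0 then acc + 1 else acc
      by_cases hz : pvF Q ((discount.drop k).take 10) = 0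
      · simp [hz]
      · rw [if_neg hz, if_neg (by simp; omega)]
    rw [PySem.List.foldl_ite_add_one]
    -- ===== B side =====
    have hsl0 : PySem.List.slice discount none (some 10) = discount.take 10 := by
      simp [pysem]
    rw [hsl0]
    rw [PySem.List.pyRange_one 10 (n : Int)]
    have hB : ((n : Int) - 10).toNat = n - 10 := by omega
    rw [hB]
    set I := (List.foldl (fun (s : PySem.Dict String Int × Int) name =>
        (s.1.insert name (s.1.getD name 0 + 1),
         if s.1.getD name 0 + 1 > Q.getD name 0 then s.2 + 1 else s.2))
        (PySem.Dict.empty, 0) (discount.take 10)) with hIdef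
    obtain ⟨hi1, hi2⟩ := pvLemB Q (discount.take 10) [] PySem.Dict.empty 0 (fun nm => by simp)
    rw [List.nil_append] at hi1 hi2
    rw [← hIdef] at hi1 hi2
    have he0 : I.2 = pvF Q (discount.take 10) := by rw [hi2, pvF_nil]; ring
    have ha0 : (if (I.2 == 0) = true then (1 : Int) else 0)
        = ((List.range 1).countP (fun k => decide (pvF Q ((discount.drop k).take 10) = 0)) : Int) := by
      rw [he0]
      by_cases hz : pvF Q (discount.take 10) = 0 <;> simp [hz]
    obtain ⟨hs1, hs2, hs3⟩ := pvSlide Q discount I.1 I.2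
      (if (I.2 == 0) = true then (1 : Int) else 0) hi1 he0 ha0 (n - 10) (Nat.le_refl _) h10
    have h9 : n - 10 + 1 = n - 9 := by omega
    rw [h9] at hs3
    exact (zero_add _).trans hs3.symm

-- ===== VERDICT (by name: the statement is the Claim_ definition above) =====
theorem solution_spec : Claim_equal_solution := by
  intro want number discount _ hpre
  unfold Spec_solution
  exact pvMain want number discount hpre
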